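-- pv_equiv track=rewrite | github.com/hzwuhao8/ccc | 2018/j05.py | short1
-- ===== SOURCE A (Python) =====
-- def myprint(x):
--     pass
--
-- def path_one_step1(E, n, revE):
--     res = revE.get(n, [])
--
--     myprint(f"节点={n} 找到的节点 res={res}")
--     return res
--
-- def path_one_step(E, nList, revE):
--     res = []
--     for n in nList:
--         t1 = path_one_step1(E, n, revE)
--         for x in t1:
--             if x in res or x in nList:
--                 pass
--             else:
--                 res.append(x)
--     myprint(f"nList={nList} 找到的节点 res={res}")
--     return res
--
-- def short1(E, n, revE):
--     beginList = [n]
--     if 1 in beginList: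
--         return 1
--
--     extends = []
--
--     for i in range(100):
--         myprint(f"*************第{i}次扩张")
--         extends = path_one_step(E, beginList, revE)
--         if extends == []:
--             return -1
--
--         if 1 in extends:
--             return i + 2
--         else:
--             beginList = extends
--
--     return -1
-- ===== SOURCE B (Python) =====
-- def short1(E, n, revE):
--     # Standard BFS over reverse edges with a global visited set, capped at 100 levels (alternative algorithm; same result).
--     if n == 1:
--         return 1
--     visited = {n}
--     frontier = [n]
--     for i in range(100):
--         nxt = []
--         for u in frontier:
--             for x in revE.get(u, []):
--                 if x not in visited:
--                     visited.add(x)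
--                     nxt.append(x)
--         if not nxt:
--             return -1
--         if 1 in nxt:
--             return i + 2
--         frontier = nxt
--     return -1
-- ===== Notes on version B (the rewrite author's own statement) =====
-- stated objective: alternative
-- what changed: Replaced A's per-level expansion that excludes only the current frontier (re-expanding already-visited nodes each level) by a standard BFS with a global visited set, so each node is expanded at most once.
import Mathlib
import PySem

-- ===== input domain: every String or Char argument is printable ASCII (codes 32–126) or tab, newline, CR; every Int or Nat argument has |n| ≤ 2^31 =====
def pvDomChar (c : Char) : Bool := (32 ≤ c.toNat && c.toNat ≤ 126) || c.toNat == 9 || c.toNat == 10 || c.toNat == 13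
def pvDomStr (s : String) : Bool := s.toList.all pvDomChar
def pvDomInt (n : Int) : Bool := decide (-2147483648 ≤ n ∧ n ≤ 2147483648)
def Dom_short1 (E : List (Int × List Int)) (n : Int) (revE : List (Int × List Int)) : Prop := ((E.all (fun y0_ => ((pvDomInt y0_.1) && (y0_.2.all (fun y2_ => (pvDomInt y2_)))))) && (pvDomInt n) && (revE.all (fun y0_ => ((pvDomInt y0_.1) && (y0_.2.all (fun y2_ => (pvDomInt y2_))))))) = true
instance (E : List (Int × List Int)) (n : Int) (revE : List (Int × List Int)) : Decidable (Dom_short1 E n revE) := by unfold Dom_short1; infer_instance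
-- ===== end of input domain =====

-- B replaces A's level expansion (which excludes only the current frontier, re-visiting
-- old nodes) by a standard BFS with a global visited set (objective: alternative algorithm;
-- each node is expanded at most once).

-- ===== PORT A =====
def pathOneStep1 (E : List (Int × List Int)) (n : Int) (revE : List (Int × List Int)) : List Int :=
  PySem.Dict.getD (PySem.Dict.mk revE) n []

def pathOneStep (E : List (Int × List Int)) (nList : List Int) (revE : List (Int × List Int)) : List Int :=
  nList.foldl (fun res u =>
    (pathOneStep1 E u revE).foldl (fun res x =>
      if x ∈ res ∨ x ∈ nList then res else res ++ [x]) res) []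

def short1Loop (E : List (Int × List Int)) (revE : List (Int × List Int))
    (beginList : List Int) (i : Nat) (fuel : Nat) : Int :=
  match fuel with
  | 0 => -1
  | f + 1 =>
    let ext := pathOneStep E beginList revE
    if ext = [] then -1
    else if (1 : Int) ∈ ext then (i : Int) + 2
    else short1Loop E revE ext (i + 1) f

def short1 (E : List (Int × List Int)) (n : Int) (revE : List (Int × List Int)) : Int :=
  if (1 : Int) ∈ [n] then 1 else short1Loop E revE [n] 0 100

-- ===== PORT B =====
def bfsExpand (revE : List (Int × List Int)) (frontier : List Int)
    (visited : PySem.Set Int) : PySem.Set Int × List Int :=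
  frontier.foldl (fun st u =>
    (PySem.Dict.getD (PySem.Dict.mk revE) u []).foldl (fun st x =>
      if x ∈ st.1 then st else (PySem.Set.add st.1 x, st.2 ++ [x])) st) (visited, [])

def short1AltLoop (revE : List (Int × List Int)) (frontier : List Int)
    (visited : PySem.Set Int) (i : Nat) (fuel : Nat) : Int :=
  match fuel with
  | 0 => -1
  | f + 1 =>
    let p := bfsExpand revE frontier visited
    if p.2 = [] then -1
    else if (1 : Int) ∈ p.2 then (i : Int) + 2
    else short1AltLoop revE p.2 p.1 (i + 1) f

def short1_alt (E : List (Int × List Int)) (n : Int) (revE : List (Int × List Int)) : Int :=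
  if n = 1 then 1 else short1AltLoop revE [n] (PySem.Set.ofList [n]) 0 100

-- ===== PRECONDITION & SPEC =====
def Spec_short1 (E : List (Int × List Int)) (n : Int) (revE : List (Int × List Int)) (out : Int) : Prop := out = short1_alt E n revE
instance (E : List (Int × List Int)) (n : Int) (revE : List (Int × List Int)) (out : Int) : Decidable (Spec_short1 E n revE out) := by unfold Spec_short1; infer_instance

-- ===== CLAIM (what is proved, stated in full; the proofs are below) =====
def Claim_equal_short1 : Prop := ∀ (E : List (Int × List Int)) (n : Int) (revE : List (Int × List Int)), Dom_short1 E n revE → Spec_short1 E n revE (short1 E n revE)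

-- ===== LEMMAS AND PROOFS =====

-- x is reachable from n by a walk of exactly k reverse-edge steps
def Reach (revE : List (Int × List Int)) (n : Int) : Nat → Int → Prop
  | 0, x => x = n
  | k + 1, x => ∃ u, Reach revE n k u ∧ x ∈ pathOneStep1 [] u revE

-- x is at distance exactly k from n
def DistEq (revE : List (Int × List Int)) (n : Int) (k : Nat) (x : Int) : Prop :=
  Reach revE n k x ∧ ∀ j < k, ¬ Reach revE n j x

theorem mem_pathOneStep_inner (nList : List Int) (t1 : List Int) (res : List Int) (x : Int) :
    x ∈ t1.foldl (fun res x => if x ∈ res ∨ x ∈ nList then res else res ++ [x]) res ↔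
      x ∈ res ∨ (x ∈ t1 ∧ x ∉ nList) := by
  induction t1 generalizing res with
  | nil => simp
  | cons a t ih =>
    simp only [List.foldl_cons, ih]
    by_cases h : a ∈ res ∨ a ∈ nList
    · simp only [if_pos h]
      constructor
      · rintro (hr | ⟨ht, hn⟩)
        · exact Or.inl hr
        · exact Or.inr ⟨List.mem_cons_of_mem _ ht, hn⟩
      · rintro (hr | ⟨ht, hn⟩)
        · exact Or.inl hr
        · rcases List.mem_cons.1 ht with rfl | ht
          · rcases h with h | h
            · exact Or.inl h
            · exact absurd h hn
          · exact Or.inr ⟨ht, hn⟩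
    · rw [if_neg (not_or.mpr ⟨fun hr => h (Or.inl hr), fun hn => h (Or.inr hn)⟩)]
      simp only [List.mem_append, List.mem_singleton]
      constructor
      · rintro ((hr | rfl) | ⟨ht, hn⟩)
        · exact Or.inl hr
        · exact Or.inr ⟨List.mem_cons_self, fun hn => h (Or.inr hn)⟩
        · exact Or.inr ⟨List.mem_cons_of_mem _ ht, hn⟩
      · rintro (hr | ⟨ht, hn⟩)
        · exact Or.inl (Or.inl hr)
        · rcases List.mem_cons.1 ht with rfl | ht
          · exact Or.inl (Or.inr rfl)
          · exact Or.inr ⟨ht, hn⟩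

theorem mem_pathOneStep_outer (E : List (Int × List Int)) (revE : List (Int × List Int))
    (nList : List Int) (L : List Int) (res : List Int) (x : Int) :
    x ∈ L.foldl (fun res u =>
        (pathOneStep1 E u revE).foldl (fun res x =>
          if x ∈ res ∨ x ∈ nList then res else res ++ [x]) res) res ↔
      x ∈ res ∨ ((∃ u ∈ L, x ∈ pathOneStep1 E u revE) ∧ x ∉ nList) := by
  induction L generalizing res with
  | nil => simp
  | cons a l ih =>
    simp only [List.foldl_cons, ih, mem_pathOneStep_inner]
    constructor
    · rintro ((hr | ⟨ht, hn⟩) | ⟨⟨u, hu, hx⟩, hn⟩)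
      · exact Or.inl hr
      · exact Or.inr ⟨⟨a, List.mem_cons_self, ht⟩, hn⟩
      · exact Or.inr ⟨⟨u, List.mem_cons_of_mem _ hu, hx⟩, hn⟩
    · rintro (hr | ⟨⟨u, hu, hx⟩, hn⟩)
      · exact Or.inl (Or.inl hr)
      · rcases List.mem_cons.1 hu with rfl | hu
        · exact Or.inl (Or.inr ⟨hx, hn⟩)
        · exact Or.inr ⟨⟨u, hu, hx⟩, hn⟩

theorem mem_pathOneStep (E : List (Int × List Int)) (nList : List Int)
    (revE : List (Int × List Int)) (x : Int) :
    x ∈ pathOneStep E nList revE ↔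
      (∃ u ∈ nList, x ∈ pathOneStep1 E u revE) ∧ x ∉ nList := by
  unfold pathOneStep
  rw [mem_pathOneStep_outer]
  simp

theorem pathOneStep1_E (E E' : List (Int × List Int)) (u : Int) (revE : List (Int × List Int)) :
    pathOneStep1 E u revE = pathOneStep1 E' u revE := rfl

-- the inner fold of bfsExpand, over one adjacency list
theorem bfs_inner (t1 : List Int) (st : PySem.Set Int × List Int) (visited : PySem.Set Int)
    (hst : ∀ y, y ∈ st.1 ↔ y ∈ visited ∨ y ∈ st.2) :
    let st' := t1.foldl (fun st x =>
      if x ∈ st.1 then st else (PySem.Set.add st.1 x, st.2 ++ [x])) st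
    (∀ y, y ∈ st'.1 ↔ y ∈ visited ∨ y ∈ st'.2) ∧
    (∀ x, x ∈ st'.2 ↔ x ∈ st.2 ∨ (x ∈ t1 ∧ x ∉ visited)) := by
  induction t1 generalizing st with
  | nil => exact ⟨hst, by simp⟩
  | cons a t ih =>
    simp only [List.foldl_cons]
    by_cases h : a ∈ st.1
    · obtain ⟨h1, h2⟩ := ih st hst
      rw [if_pos h]
      refine ⟨h1, fun x => ?_⟩
      rw [h2]
      have := (hst a).1 h
      constructor
      · rintro (hx | ⟨ht, hv⟩)
        · exact Or.inl hx
        · exact Or.inr ⟨List.mem_cons_of_mem _ ht, hv⟩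
      · rintro (hx | ⟨ht, hv⟩)
        · exact Or.inl hx
        · rcases List.mem_cons.1 ht with rfl | ht
          · rcases this with hv' | hs
            · exact absurd hv' hv
            · exact Or.inl hs
          · exact Or.inr ⟨ht, hv⟩
    · rw [if_neg h]
      have hst' : ∀ y, y ∈ (PySem.Set.add st.1 a, st.2 ++ [a]).1 ↔
          y ∈ visited ∨ y ∈ (PySem.Set.add st.1 a, st.2 ++ [a]).2 := by
        intro y
        simp only [PySem.Set.mem_add, hst y, List.mem_append, List.mem_singleton]
        tauto
      obtain ⟨h1, h2⟩ := ih _ hst'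
      refine ⟨h1, fun x => ?_⟩
      rw [h2]
      simp only [List.mem_append, List.mem_singleton]
      have hav : a ∉ visited := fun hv => h ((hst a).2 (Or.inl hv))
      constructor
      · rintro ((hx | rfl) | ⟨ht, hv⟩)
        · exact Or.inl hx
        · exact Or.inr ⟨List.mem_cons_self, hav⟩
        · exact Or.inr ⟨List.mem_cons_of_mem _ ht, hv⟩
      · rintro (hx | ⟨ht, hv⟩)
        · exact Or.inl (Or.inl hx)
        · rcases List.mem_cons.1 ht with rfl | ht
          · exact Or.inl (Or.inr rfl)
          · exact Or.inr ⟨ht, hv⟩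

theorem bfs_outer (revE : List (Int × List Int)) (L : List Int)
    (st : PySem.Set Int × List Int) (visited : PySem.Set Int)
    (hst : ∀ y, y ∈ st.1 ↔ y ∈ visited ∨ y ∈ st.2) :
    let st' := L.foldl (fun st u =>
      (PySem.Dict.getD (PySem.Dict.mk revE) u []).foldl (fun st x =>
        if x ∈ st.1 then st else (PySem.Set.add st.1 x, st.2 ++ [x])) st) st
    (∀ y, y ∈ st'.1 ↔ y ∈ visited ∨ y ∈ st'.2) ∧
    (∀ x, x ∈ st'.2 ↔ x ∈ st.2 ∨ ((∃ u ∈ L, x ∈ pathOneStep1 [] u revE) ∧ x ∉ visited)) := by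
  induction L generalizing st with
  | nil => exact ⟨hst, by simp⟩
  | cons a l ih =>
    simp only [List.foldl_cons]
    obtain ⟨g1, g2⟩ := bfs_inner (PySem.Dict.getD (PySem.Dict.mk revE) a []) st visited hst
    obtain ⟨h1, h2⟩ := ih _ g1
    refine ⟨h1, fun x => ?_⟩
    rw [h2, g2]
    unfold pathOneStep1
    constructor
    · rintro ((hx | ⟨ht, hv⟩) | ⟨⟨u, hu, hx⟩, hv⟩)
      · exact Or.inl hx
      · exact Or.inr ⟨⟨a, List.mem_cons_self, ht⟩, hv⟩
      · exact Or.inr ⟨⟨u, List.mem_cons_of_mem _ hu, hx⟩, hv⟩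
    · rintro (hx | ⟨⟨u, hu, hx⟩, hv⟩)
      · exact Or.inl (Or.inl hx)
      · rcases List.mem_cons.1 hu with rfl | hu
        · exact Or.inl (Or.inr ⟨hx, hv⟩)
        · exact Or.inr ⟨⟨u, hu, hx⟩, hv⟩

theorem mem_bfsExpand (revE : List (Int × List Int)) (F : List Int) (V : PySem.Set Int) :
    (∀ x, x ∈ (bfsExpand revE F V).2 ↔
        (∃ u ∈ F, x ∈ pathOneStep1 [] u revE) ∧ x ∉ V) ∧
    (∀ y, y ∈ (bfsExpand revE F V).1 ↔ y ∈ V ∨ y ∈ (bfsExpand revE F V).2) := by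
  obtain ⟨h1, h2⟩ := bfs_outer revE F (V, []) V (by simp)
  exact ⟨fun x => by rw [bfsExpand, h2]; simp, fun y => by rw [bfsExpand, h1]⟩

-- a node at distance k+1 has a predecessor at distance exactly k
theorem distEq_pred (revE : List (Int × List Int)) (n : Int) (k : Nat) (x : Int)
    (h : DistEq revE n (k + 1) x) :
    ∃ u, DistEq revE n k u ∧ x ∈ pathOneStep1 [] u revE := by
  obtain ⟨⟨u, hu, hx⟩, hmin⟩ := h
  refine ⟨u, ⟨hu, fun j hj hr => ?_⟩, hx⟩
  exact hmin (j + 1) (by omega) ⟨u, hr, hx⟩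

theorem distEq_down (revE : List (Int × List Int)) (n : Int) :
    ∀ (m : Nat) (x : Int), DistEq revE n m x → ∀ k ≤ m, ∃ v, DistEq revE n k v := by
  intro m
  induction m with
  | zero =>
    intro x h k hk
    have hk0 : k = 0 := by omega
    subst hk0
    exact ⟨x, h⟩
  | succ m ih =>
    intro x h k hk
    rcases Nat.lt_or_ge k (m + 1) with hlt | hge
    · obtain ⟨u, hu, _⟩ := distEq_pred revE n m x h
      exact ih u hu k (by omega)
    · have : k = m + 1 := by omega
      subst this; exact ⟨x, h⟩

theorem reach_min (revE : List (Int × List Int)) (n : Int) :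
    ∀ (j : Nat) (x : Int), Reach revE n j x → ∃ m ≤ j, DistEq revE n m x := by
  intro j
  induction j using Nat.strong_induction_on with
  | _ j ih =>
    intro x hx
    by_cases h : ∃ k < j, Reach revE n k x
    · obtain ⟨k, hk, hr⟩ := h
      obtain ⟨m, hm, hd⟩ := ih k hk x hr
      exact ⟨m, by omega, hd⟩
    · push_neg at h
      exact ⟨j, le_refl j, hx, h⟩

-- if 1 is nowhere reachable, A's loop always returns -1
theorem loopA_neverone (E revE : List (Int × List Int)) (n : Int)
    (hno : ∀ j, ¬ Reach revE n j 1) :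
    ∀ (fuel i : Nat) (L : List Int), (∀ x ∈ L, ∃ k, Reach revE n k x) →
      short1Loop E revE L i fuel = -1 := by
  intro fuel
  induction fuel with
  | zero => intro i L _; rfl
  | succ f ih =>
    intro i L hL
    rw [short1Loop]
    have hext : ∀ x ∈ pathOneStep E L revE, ∃ k, Reach revE n k x := by
      intro x hx
      obtain ⟨⟨u, hu, hxu⟩, _⟩ := (mem_pathOneStep E L revE x).1 hx
      obtain ⟨k, hk⟩ := hL u hu
      exact ⟨k + 1, u, hk, (pathOneStep1_E E [] u revE) ▸ hxu⟩
    by_cases he : pathOneStep E L revE = []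
    · simp [he]
    · have h1 : (1 : Int) ∉ pathOneStep E L revE := by
        intro h
        obtain ⟨k, hk⟩ := hext 1 h
        exact hno k hk
      simp only [if_neg he, if_neg h1]
      exact ih (i + 1) _ hext

-- if 1 is nowhere reachable, B's loop always returns -1
theorem loopB_neverone (revE : List (Int × List Int)) (n : Int)
    (hno : ∀ j, ¬ Reach revE n j 1) :
    ∀ (fuel i : Nat) (F : List Int) (V : PySem.Set Int),
      (∀ x ∈ F, ∃ k, Reach revE n k x) → short1AltLoop revE F V i fuel = -1 := by
  intro fuel
  induction fuel with
  | zero => intro i F V _; rfl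
  | succ f ih =>
    intro i F V hF
    rw [short1AltLoop]
    obtain ⟨hmem, _⟩ := mem_bfsExpand revE F V
    have hext : ∀ x ∈ (bfsExpand revE F V).2, ∃ k, Reach revE n k x := by
      intro x hx
      obtain ⟨⟨u, hu, hxu⟩, _⟩ := (hmem x).1 hx
      obtain ⟨k, hk⟩ := hF u hu
      exact ⟨k + 1, u, hk, hxu⟩
    by_cases he : (bfsExpand revE F V).2 = []
    · simp [he]
    · have h1 : (1 : Int) ∉ (bfsExpand revE F V).2 := by
        intro h
        obtain ⟨k, hk⟩ := hext 1 h
        exact hno k hk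
      simp only [if_neg he, if_neg h1]
      exact ih (i + 1) _ _ hext

-- the lockstep invariant: both loops agree
theorem loop_eq (E revE : List (Int × List Int)) (n : Int) :
    ∀ (fuel i : Nat) (L F : List Int) (V : PySem.Set Int),
      (∀ x ∈ L, Reach revE n i x) →
      (∀ x, DistEq revE n i x → x ∈ L) →
      (∀ x ∈ F, Reach revE n i x) →
      (∀ x, DistEq revE n i x → x ∈ F) →
      (∀ x ∈ V, ∃ k ≤ i, Reach revE n k x) →
      (∀ k ≤ i, ¬ Reach revE n k 1) →
      short1Loop E revE L i fuel = short1AltLoop revE F V i fuel := by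
  intro fuel
  induction fuel with
  | zero => intro i L F V _ _ _ _ _ _; rfl
  | succ f ih =>
    intro i L F V hL1 hL2 hF1 hF2 hV h6
    rw [short1Loop, short1AltLoop]
    set ext := pathOneStep E L revE with hextdef
    obtain ⟨hmemN, hmemV⟩ := mem_bfsExpand revE F V
    set nxt := (bfsExpand revE F V).2 with hnxtdef
    set V' := (bfsExpand revE F V).1 with hV'def
    -- membership characterizations
    have memExt : ∀ x, x ∈ ext ↔ (∃ u ∈ L, x ∈ pathOneStep1 [] u revE) ∧ x ∉ L := by
      intro x
      rw [hextdef, mem_pathOneStep]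
      constructor
      · rintro ⟨⟨u, hu, hx⟩, hn⟩; exact ⟨⟨u, hu, (pathOneStep1_E E [] u revE) ▸ hx⟩, hn⟩
      · rintro ⟨⟨u, hu, hx⟩, hn⟩; exact ⟨⟨u, hu, (pathOneStep1_E [] E u revE) ▸ hx⟩, hn⟩
    -- reachability of the new layers
    have extReach : ∀ x ∈ ext, Reach revE n (i + 1) x := by
      intro x hx
      obtain ⟨⟨u, hu, hxu⟩, _⟩ := (memExt x).1 hx
      exact ⟨u, hL1 u hu, hxu⟩
    have nxtReach : ∀ x ∈ nxt, Reach revE n (i + 1) x := by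
      intro x hx
      obtain ⟨⟨u, hu, hxu⟩, _⟩ := (hmemN x).1 hx
      exact ⟨u, hF1 u hu, hxu⟩
    -- the distance-(i+1) layer is contained in both new layers
    have distExt : ∀ x, DistEq revE n (i + 1) x → x ∈ ext := by
      intro x hx
      obtain ⟨u, hu, hxu⟩ := distEq_pred revE n i x hx
      refine (memExt x).2 ⟨⟨u, hL2 u hu, hxu⟩, fun hxL => ?_⟩
      exact hx.2 i (by omega) (hL1 x hxL)
    have distNxt : ∀ x, DistEq revE n (i + 1) x → x ∈ nxt := by
      intro x hx
      obtain ⟨u, hu, hxu⟩ := distEq_pred revE n i x hx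
      refine (hmemN x).2 ⟨⟨u, hF2 u hu, hxu⟩, fun hxV => ?_⟩
      obtain ⟨k, hk, hr⟩ := hV x hxV
      exact hx.2 k (by omega) hr
    -- 1 in the new layer of A iff in the new layer of B
    have one_iff : (1 : Int) ∈ ext ↔ (1 : Int) ∈ nxt := by
      constructor
      · intro h
        exact distNxt 1 ⟨extReach 1 h, fun j hj => h6 j (by omega)⟩
      · intro h
        exact distExt 1 ⟨nxtReach 1 h, fun j hj => h6 j (by omega)⟩
    by_cases he : ext = []
    · by_cases hn : nxt = []
      · simp [he, hn]
      · -- A stops with -1; B never finds 1 either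
        have hd : ∀ x, ¬ DistEq revE n (i + 1) x := by
          intro x hx
          have := distExt x hx
          rw [he] at this
          exact absurd this (List.not_mem_nil)
        have hno : ∀ j, ¬ Reach revE n j 1 := by
          intro j hr
          obtain ⟨m, hm, hdm⟩ := reach_min revE n j 1 hr
          rcases Nat.lt_or_ge m (i + 1) with hlt | hge
          · exact h6 m (by omega) hdm.1
          · obtain ⟨v, hv⟩ := distEq_down revE n m 1 hdm (i + 1) hge
            exact hd v hv
        have h1n : (1 : Int) ∉ nxt := fun h => hno (i + 1) (nxtReach 1 h)
        simp only [if_pos he, if_neg hn, if_neg h1n]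
        exact (loopB_neverone revE n hno f (i + 1) nxt V'
          (fun x hx => ⟨i + 1, nxtReach x hx⟩)).symm
    · by_cases hn : nxt = []
      · -- B stops with -1; A never finds 1 either
        have hd : ∀ x, ¬ DistEq revE n (i + 1) x := by
          intro x hx
          have := distNxt x hx
          rw [hn] at this
          exact absurd this (List.not_mem_nil)
        have hno : ∀ j, ¬ Reach revE n j 1 := by
          intro j hr
          obtain ⟨m, hm, hdm⟩ := reach_min revE n j 1 hr
          rcases Nat.lt_or_ge m (i + 1) with hlt | hge
          · exact h6 m (by omega) hdm.1
          · obtain ⟨v, hv⟩ := distEq_down revE n m 1 hdm (i + 1) hge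
            exact hd v hv
        have h1e : (1 : Int) ∉ ext := fun h => hno (i + 1) (extReach 1 h)
        simp only [if_neg he, if_pos hn, if_neg h1e]
        exact loopA_neverone E revE n hno f (i + 1) ext
          (fun x hx => ⟨i + 1, extReach x hx⟩)
      · by_cases h1 : (1 : Int) ∈ ext
        · have h1' : (1 : Int) ∈ nxt := one_iff.1 h1
          simp [he, hn, h1, h1']
        · have h1' : (1 : Int) ∉ nxt := fun h => h1 (one_iff.2 h)
          simp only [if_neg he, if_neg hn, if_neg h1, if_neg h1']
          -- recurse with the new invariants
          apply ih (i + 1) ext nxt V' extReach distExt nxtReach distNxt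
          · intro x hx
            rcases (hmemV x).1 hx with hxV | hxn
            · obtain ⟨k, hk, hr⟩ := hV x hxV
              exact ⟨k, by omega, hr⟩
            · exact ⟨i + 1, le_refl _, nxtReach x hxn⟩
          · intro k hk hr
            rcases Nat.lt_or_ge k (i + 1) with hlt | hge
            · exact h6 k (by omega) hr
            · have hkk : k = i + 1 := by omega
              subst hkk
              exact h1 (distExt 1 ⟨hr, fun j hj => h6 j (by omega)⟩)

-- ===== VERDICT (by name: the statement is the Claim_ definition above) =====
theorem short1_spec : Claim_equal_short1 := by
  intro E n revE _
  unfold Spec_short1 short1 short1_alt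
  by_cases h : n = 1
  · subst h; simp
  · have h1 : (1 : Int) ∉ [n] := by simp [Ne.symm h]
    rw [if_neg (by simpa using h1), if_neg h]
    apply loop_eq E revE n 100 0 [n] [n] (PySem.Set.ofList [n])
    · intro x hx; rcases List.mem_singleton.1 hx with rfl; exact rfl
    · intro x hx; exact List.mem_singleton.2 hx.1
    · intro x hx; rcases List.mem_singleton.1 hx with rfl; exact rfl
    · intro x hx; exact List.mem_singleton.2 hx.1
    · intro x hx
      have : x = n := by simpa [PySem.Set.ofList] using hx
      exact ⟨0, le_refl _, this⟩
    · intro k hk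
      have : k = 0 := by omega
      subst this
      exact fun hr => h (by simpa [Reach] using hr.symm)
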